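-- pv_equiv track=rewrite | github.com/jowie1508/HPC_repo | clustering_maths_chunked.py | map_to_broad_category
-- ===== SOURCE A (Python) =====
-- CATEGORY_GROUPS = {
--     "physics": ["physics", "astro-ph", "quant-ph", "hep-th", "cond-mat", "gr-qc", "hep-ph", "nucl-th", "hep-ex", "hep-lat", "nucl-ex", "eess"],
--     "math": ["math", "math-ph", "stat", "nlin"],
--     "finances": ["econ", "q-fin"],
--     "computer_science": ["cs"],
--     "biology": ["q-bio"]
-- }
--
-- def map_to_broad_category(category_str):
--     if not isinstance(category_str, str):
--         return None  # Return None for invalid entries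
--
--     # Extract the main category
--     categories = category_str.split()
--     main_categories = [cat.split(".")[0] for cat in categories]
--     main_category = main_categories[0]
--
--     # Map the main category to a broader group
--     for broad_category, category_list in CATEGORY_GROUPS.items():
--         if main_category in category_list:
--             return broad_category
--
--     # If no match, return "others"
--     return "others"
-- ===== SOURCE B (Python) =====
-- # Flat (subcategory, broad group) table, kept sorted by key for binary search.
-- _TABLE = [
--     ("astro-ph", "physics"), ("cond-mat", "physics"), ("cs", "computer_science"),
--     ("econ", "finances"), ("eess", "physics"), ("gr-qc", "physics"),
--     ("hep-ex", "physics"), ("hep-lat", "physics"), ("hep-ph", "physics"),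
--     ("hep-th", "physics"), ("math", "math"), ("math-ph", "math"),
--     ("nlin", "math"), ("nucl-ex", "physics"), ("nucl-th", "physics"),
--     ("physics", "physics"), ("q-bio", "biology"), ("q-fin", "finances"),
--     ("quant-ph", "physics"), ("stat", "math"),
-- ]
--
-- def _bsearch(key):
--     lo, hi = 0, len(_TABLE)
--     while lo < hi:
--         mid = (lo + hi) // 2
--         k, v = _TABLE[mid]
--         if k < key:
--             lo = mid + 1
--         elif k > key:
--             hi = mid
--         else:
--             return v
--     return "others"
--
-- def map_to_broad_category(category_str):
--     if not isinstance(category_str, str):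
--         return None
--     # single scan: skip leading whitespace, then collect the main-category
--     # prefix of the first token (up to the first '.' or whitespace)
--     n = len(category_str)
--     i = 0
--     while i < n and category_str[i].isspace():
--         i += 1
--     if i == n:
--         return "others"  # no category token at all
--     j = i
--     while j < n and category_str[j] != "." and not category_str[j].isspace():
--         j += 1
--     return _bsearch(category_str[i:j])
-- ===== Notes on version B (the rewrite author's own statement) =====
-- stated objective: alternative
-- what changed: B does a single index scan over the characters (skip leading whitespace, cut the first token at '.' or whitespace) instead of building token lists with split()/list-of-splits, and classifies the extracted key by binary search over one flat sorted (subcategory, group) table instead of A's linear loop over groups with inner membership tests.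
import Mathlib
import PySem

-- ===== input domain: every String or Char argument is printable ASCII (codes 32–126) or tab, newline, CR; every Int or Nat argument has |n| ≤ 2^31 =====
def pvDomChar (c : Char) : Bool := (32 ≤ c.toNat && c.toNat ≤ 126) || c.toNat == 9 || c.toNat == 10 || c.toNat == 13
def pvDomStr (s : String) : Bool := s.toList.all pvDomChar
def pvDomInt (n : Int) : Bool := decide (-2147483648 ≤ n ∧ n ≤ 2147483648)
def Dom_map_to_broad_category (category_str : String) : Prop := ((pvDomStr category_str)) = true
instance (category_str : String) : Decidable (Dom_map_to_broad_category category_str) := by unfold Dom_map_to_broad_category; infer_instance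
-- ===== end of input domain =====

-- B replaces A's staged token-list splitting and linear loop over group lists by a single
-- character scan extracting the main-category prefix, classified by binary search over one
-- flat sorted table; objective: alternative.

-- ===== PORT A =====
def CATEGORY_GROUPS : List (String × List String) :=
  [("physics", ["physics", "astro-ph", "quant-ph", "hep-th", "cond-mat", "gr-qc", "hep-ph", "nucl-th", "hep-ex", "hep-lat", "nucl-ex", "eess"]),
   ("math", ["math", "math-ph", "stat", "nlin"]),
   ("finances", ["econ", "q-fin"]),
   ("computer_science", ["cs"]),
   ("biology", ["q-bio"])]

-- the 'for broad_category, category_list in CATEGORY_GROUPS.items(): if main_category in category_list: return broad_category' loop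
def groupLoop : List (String × List String) → String → String
  | [], _ => "others"
  | (broad, cats) :: rest, m => if cats.contains m then broad else groupLoop rest m

def map_to_broad_category (category_str : String) : Option String :=
  -- isinstance(category_str, str) always holds for a String argument
  let categories := PySem.Str.split₀ category_str
  let main_categories := categories.map (fun cat => ((PySem.Str.split? cat ".").getD []).headD "")
  match PySem.List.pyGet? main_categories 0 with
  | none => none       -- IndexError on whitespace-only input; excluded by Pre_
  | some main_category => some (groupLoop CATEGORY_GROUPS main_category)

-- ===== PORT B =====
-- _TABLE: the flat (subcategory, broad group) pairs, sorted by key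
def pvTable : List (String × String) :=
  [("astro-ph", "physics"), ("cond-mat", "physics"), ("cs", "computer_science"),
   ("econ", "finances"), ("eess", "physics"), ("gr-qc", "physics"),
   ("hep-ex", "physics"), ("hep-lat", "physics"), ("hep-ph", "physics"),
   ("hep-th", "physics"), ("math", "math"), ("math-ph", "math"),
   ("nlin", "math"), ("nucl-ex", "physics"), ("nucl-th", "physics"),
   ("physics", "physics"), ("q-bio", "biology"), ("q-fin", "finances"),
   ("quant-ph", "physics"), ("stat", "math")]

-- the 'while lo < hi' loop of _bsearch; fuel 21 exceeds the iteration count (the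
-- interval starts at width 20 and shrinks strictly every turn)
def bsLoop : Nat → Nat → Nat → String → String
  | 0, _, _, _ => "others"                  -- fuel exhausted: unreachable for fuel ≥ 21
  | fuel+1, lo, hi, key =>
    if lo < hi then
      let mid := (lo + hi) / 2
      match pvTable[mid]? with
      | none => "others"                    -- totality guard: mid < hi ≤ pvTable.length
      | some (k, v) =>
        -- Python's str '<' is code-point lexicographic: exactly '<' on the char lists
        if k.toList < key.toList then bsLoop fuel (mid+1) hi key
        else if key.toList < k.toList then bsLoop fuel lo mid key
        else v
    else "others"

def map_to_broad_category_alt (category_str : String) : Option String :=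
  -- the index scan 'while i < n and category_str[i].isspace()' is dropWhile on the chars;
  -- the scan to j (stop at '.' or whitespace) together with the slice [i:j] is takeWhile
  let rest := category_str.toList.dropWhile PySem.Chars.isspace
  if rest.isEmpty then some "others"        -- i == n: no category token at all
  else some (bsLoop 21 0 pvTable.length
    (String.ofList (rest.takeWhile (fun c => !(c == '.' || PySem.Chars.isspace c)))))

-- ===== PRECONDITION & SPEC =====
-- Pre_ excludes exactly the whitespace-only strings (including ""), on which A raises
-- IndexError from main_categories[0] (B's own scan finds no token and yields "others" there).
def Pre_map_to_broad_category (category_str : String) : Prop :=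
  PySem.Str.split₀ category_str ≠ []
instance (category_str : String) : Decidable (Pre_map_to_broad_category category_str) := by
  unfold Pre_map_to_broad_category; infer_instance
def pvWitness_map_to_broad_category : String := "math.AG"

def Spec_map_to_broad_category (category_str : String) (out : Option String) : Prop := out = map_to_broad_category_alt category_str
instance (category_str : String) (out : Option String) : Decidable (Spec_map_to_broad_category category_str out) := by unfold Spec_map_to_broad_category; infer_instance

-- ===== CLAIM (what is proved, stated in full; the proofs are below) =====
def Claim_equal_map_to_broad_category : Prop := ∀ (category_str : String), Dom_map_to_broad_category category_str → Pre_map_to_broad_category category_str → Spec_map_to_broad_category category_str (map_to_broad_category category_str)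

-- ===== LEMMAS AND PROOFS =====

theorem sgo_acc (l : List Char) : ∀ (cur : List Char) (acc : List (List Char)),
    PySem.Chars.split₀.go l cur acc = acc.reverse ++ PySem.Chars.split₀.go l cur [] := by
  induction l with
  | nil =>
    intro cur acc
    by_cases h : cur.isEmpty <;> simp [PySem.Chars.split₀.go, h]
  | cons c rest ih =>
    intro cur acc
    by_cases hws : PySem.Chars.isspace c
    · by_cases hc : cur.isEmpty
      · simp only [PySem.Chars.split₀.go, hws, hc, if_true]
        exact ih [] acc
      · simp only [PySem.Chars.split₀.go, hws, hc, if_true, if_false]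
        rw [ih [] (cur.reverse :: acc), ih [] [cur.reverse]]
        simp
    · simp only [PySem.Chars.split₀.go, hws, if_false]
      exact ih (c :: cur) acc

theorem split₀_ws (c : Char) (l : List Char) (h : PySem.Chars.isspace c = true) :
    PySem.Chars.split₀ (c :: l) = PySem.Chars.split₀ l := by
  simp [PySem.Chars.split₀, PySem.Chars.split₀.go, h]

theorem sgo_first (l : List Char) : ∀ (cur : List Char) (acc : List (List Char)), cur ≠ [] →
    PySem.Chars.split₀.go l cur acc =
      acc.reverse ++ (cur.reverse ++ l.takeWhile (fun c => !PySem.Chars.isspace c)) ::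
        PySem.Chars.split₀ (l.dropWhile (fun c => !PySem.Chars.isspace c)) := by
  induction l with
  | nil =>
    intro cur acc hcur
    simp [PySem.Chars.split₀.go, PySem.Chars.split₀, List.isEmpty_iff, hcur]
  | cons c rest ih =>
    intro cur acc hcur
    by_cases hws : PySem.Chars.isspace c
    · simp only [PySem.Chars.split₀.go, hws, if_true, List.isEmpty_iff, hcur, if_false]
      rw [sgo_acc, List.takeWhile_cons_of_neg (by simp [hws]),
        List.dropWhile_cons_of_neg (by simp [hws]), split₀_ws c rest hws]
      simp [PySem.Chars.split₀]
    · simp only [PySem.Chars.split₀.go, hws, if_false]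
      rw [ih (c :: cur) acc (by simp)]
      simp [List.takeWhile_cons, List.dropWhile_cons, hws]

theorem split₀_dropWhile (l : List Char) :
    PySem.Chars.split₀ (l.dropWhile PySem.Chars.isspace) = PySem.Chars.split₀ l := by
  induction l with
  | nil => rfl
  | cons c rest ih =>
    by_cases h : PySem.Chars.isspace c
    · rw [List.dropWhile_cons_of_pos h, ih, split₀_ws c rest h]
    · rw [List.dropWhile_cons_of_neg (by simp [h])]

theorem split₀_head_nonws (c : Char) (l : List Char) (h : PySem.Chars.isspace c = false) :
    PySem.Chars.split₀ (c :: l) =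
      (c :: l.takeWhile (fun c => !PySem.Chars.isspace c)) ::
        PySem.Chars.split₀ (l.dropWhile (fun c => !PySem.Chars.isspace c)) := by
  show PySem.Chars.split₀.go (c :: l) [] [] = _
  simp only [PySem.Chars.split₀.go, h, Bool.false_eq_true, if_false]
  rw [sgo_first l [c] [] (by simp)]
  simp

theorem sOn_go (fuel : Nat) : ∀ (l cur : List Char) (acc : List (List Char)), l.length ≤ fuel →
    ∃ r, PySem.Chars.splitOn.go ['.'] fuel l cur acc =
      acc.reverse ++ (cur.reverse ++ l.takeWhile (fun c => c != '.')) :: r := by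
  induction fuel with
  | zero =>
    intro l cur acc h
    have : l = [] := by cases l <;> simp_all
    subst this
    exact ⟨[], by simp [PySem.Chars.splitOn.go]⟩
  | succ n ih =>
    intro l cur acc h
    cases l with
    | nil => exact ⟨[], by simp [PySem.Chars.splitOn.go]⟩
    | cons c rest =>
      simp only [List.length_cons] at h
      by_cases hc : c = '.'
      · subst hc
        obtain ⟨r, hr⟩ := ih rest [] (cur.reverse :: acc) (by omega)
        refine ⟨(rest.takeWhile (fun c => c != '.')) :: r, ?_⟩
        simp only [PySem.Chars.splitOn.go, List.isPrefixOf, BEq.rfl, Bool.true_and,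
          List.isPrefixOf_nil_left, if_true, List.length_cons, List.drop_succ_cons,
          List.drop_zero, List.length_nil] at hr ⊢
        rw [hr]
        simp [List.takeWhile_cons]
      · obtain ⟨r, hr⟩ := ih rest (c :: cur) acc (by omega)
        refine ⟨r, ?_⟩
        have hpre : ['.'].isPrefixOf (c :: rest) = false := by
          simp [List.isPrefixOf]
          exact fun hh => absurd hh.symm hc
        simp only [PySem.Chars.splitOn.go, hpre, Bool.false_eq_true, if_false]
        rw [hr]
        simp [List.takeWhile_cons, hc]

theorem splitOn_dot (t : List Char) :
    ∃ r, PySem.Chars.splitOn t ['.'] = (t.takeWhile (fun c => c != '.')) :: r := by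
  obtain ⟨r, hr⟩ := sOn_go (t.length + 1) t [] [] (by omega)
  exact ⟨r, by simpa [PySem.Chars.splitOn] using hr⟩

theorem bsLoop_notmem (fuel : Nat) : ∀ (lo hi : Nat) (m : String),
    (∀ kv ∈ pvTable, m ≠ kv.1) → bsLoop fuel lo hi m = "others" := by
  induction fuel with
  | zero => intro lo hi m _; rfl
  | succ n ih =>
    intro lo hi m h
    unfold bsLoop
    by_cases hlh : lo < hi
    · simp only [hlh, if_true]
      cases hmid : pvTable[(lo + hi) / 2]? with
      | none => rfl
      | some kv =>
        obtain ⟨k, v⟩ := kv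
        have hk : m ≠ k := h (k, v) (List.mem_of_getElem? hmid)
        by_cases h1 : k.toList < m.toList
        · simp only [h1, if_true]; exact ih _ _ _ h
        · by_cases h2 : m.toList < k.toList
          · simp only [h1, h2, if_true, if_false]; exact ih _ _ _ h
          · exact absurd (String.toList_inj.mp (List.le_antisymm h1 h2)) hk
    · simp [hlh]

theorem groupLoop_eq_bsearch (m : String) :
    groupLoop CATEGORY_GROUPS m = bsLoop 21 0 pvTable.length m := by
  by_cases h1 : m = "physics"
  · subst h1; decide
  by_cases h2 : m = "astro-ph"
  · subst h2; decide
  by_cases h3 : m = "quant-ph"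
  · subst h3; decide
  by_cases h4 : m = "hep-th"
  · subst h4; decide
  by_cases h5 : m = "cond-mat"
  · subst h5; decide
  by_cases h6 : m = "gr-qc"
  · subst h6; decide
  by_cases h7 : m = "hep-ph"
  · subst h7; decide
  by_cases h8 : m = "nucl-th"
  · subst h8; decide
  by_cases h9 : m = "hep-ex"
  · subst h9; decide
  by_cases h10 : m = "hep-lat"
  · subst h10; decide
  by_cases h11 : m = "nucl-ex"
  · subst h11; decide
  by_cases h12 : m = "eess"
  · subst h12; decide
  by_cases h13 : m = "math"
  · subst h13; decide
  by_cases h14 : m = "math-ph"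
  · subst h14; decide
  by_cases h15 : m = "stat"
  · subst h15; decide
  by_cases h16 : m = "nlin"
  · subst h16; decide
  by_cases h17 : m = "econ"
  · subst h17; decide
  by_cases h18 : m = "q-fin"
  · subst h18; decide
  by_cases h19 : m = "cs"
  · subst h19; decide
  by_cases h20 : m = "q-bio"
  · subst h20; decide
  have hnot : ∀ kv ∈ pvTable, m ≠ kv.1 := by
    intro kv hkv hm
    subst hm
    fin_cases hkv <;> simp_all
  rw [bsLoop_notmem _ _ _ _ hnot]
  simp [groupLoop, CATEGORY_GROUPS, h1, Ne.symm h1, h2, Ne.symm h2, h3, Ne.symm h3, h4, Ne.symm h4, h5, Ne.symm h5, h6, Ne.symm h6, h7, Ne.symm h7, h8, Ne.symm h8, h9, Ne.symm h9, h10, Ne.symm h10, h11, Ne.symm h11, h12, Ne.symm h12, h13, Ne.symm h13, h14, Ne.symm h14, h15, Ne.symm h15, h16, Ne.symm h16, h17, Ne.symm h17, h18, Ne.symm h18, h19, Ne.symm h19, h20, Ne.symm h20]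

theorem head_dropWhile_false {p : Char → Bool} {l : List Char} {c : Char} {r : List Char}
    (h : l.dropWhile p = c :: r) : p c = false := by
  have hne : l.dropWhile p ≠ [] := by simp [h]
  have h2 := List.head_dropWhile_not (l := l) (p := p) hne
  have h3 : (l.dropWhile p).head hne = c := by simp [h]
  rw [h3] at h2
  simpa using h2

-- ===== VERDICT (by name: the statement is the Claim_ definition above) =====
theorem map_to_broad_category_spec : Claim_equal_map_to_broad_category := by
  intro s _ hpre
  unfold Spec_map_to_broad_category
  cases hr : s.toList.dropWhile PySem.Chars.isspace with
  | nil =>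
    exfalso
    apply hpre
    have h0 : PySem.Chars.split₀ s.toList = [] := by
      rw [← split₀_dropWhile, hr]; rfl
    simp [PySem.Str.split₀, h0]
  | cons c r' =>
    have hc : PySem.Chars.isspace c = false := head_dropWhile_false hr
    have hsplit : PySem.Chars.split₀ s.toList =
        (c :: r'.takeWhile (fun c => !PySem.Chars.isspace c)) ::
          PySem.Chars.split₀ (r'.dropWhile (fun c => !PySem.Chars.isspace c)) := by
      rw [← split₀_dropWhile, hr, split₀_head_nonws c r' hc]
    obtain ⟨rr, hdot⟩ := splitOn_dot (c :: r'.takeWhile (fun c => !PySem.Chars.isspace c))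
    unfold map_to_broad_category map_to_broad_category_alt
    simp [PySem.Str.split₀, hsplit, PySem.List.pyGet?, PySem.List.pyIdx?, PySem.Str.split?,
      PySem.Chars.split?, String.toList_ofList, hdot, hr, groupLoop_eq_bsearch]
    congr 1
    rw [show c :: List.takeWhile (fun c => !PySem.Chars.isspace c) r' =
        List.takeWhile (fun c => !PySem.Chars.isspace c) (c :: r') by
      simp [List.takeWhile_cons, hc]]
    rw [List.takeWhile_takeWhile]
    have hfun : (fun a => decide ((a != '.') = true ∧ (!PySem.Chars.isspace a) = true)) =
        (fun c : Char => !c == '.' && !PySem.Chars.isspace c) := by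
      funext a
      cases ha : PySem.Chars.isspace a <;> cases hd : a == '.' <;>
        simp_all [beq_iff_eq]
    rw [hfun]
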